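-- pv_equiv track=rewrite | github.com/satlank/aoc | python/2020/d21/main.py | get_food_by_allergens
-- ===== SOURCE A (Python) =====
-- def get_food_by_allergens(food):
--     tmp = {}
--     for (i, (ingredients, allergens)) in enumerate(food):
--         for a in allergens:
--             if a not in tmp:
--                 tmp[a] = [i]
--             else:
--                 tmp[a].append(i)
--     return tmp
-- ===== SOURCE B (Python) =====
-- def get_food_by_allergens(food):
--     order = dict.fromkeys(a for _, allergens in food for a in allergens)
--     return {a: [i for i, (_, alls) in enumerate(food) for x in alls if x == a]
--             for a in order}
-- ===== Notes on version B (the rewrite author's own statement) =====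
-- stated objective: simpler
-- what changed: Replaces the incremental dict-maintenance loop with a two-step pipeline: dedup the flattened allergens once (dict.fromkeys) to fix the key order, then build each allergen's index list by one comprehension over the foods.
import Mathlib
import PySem

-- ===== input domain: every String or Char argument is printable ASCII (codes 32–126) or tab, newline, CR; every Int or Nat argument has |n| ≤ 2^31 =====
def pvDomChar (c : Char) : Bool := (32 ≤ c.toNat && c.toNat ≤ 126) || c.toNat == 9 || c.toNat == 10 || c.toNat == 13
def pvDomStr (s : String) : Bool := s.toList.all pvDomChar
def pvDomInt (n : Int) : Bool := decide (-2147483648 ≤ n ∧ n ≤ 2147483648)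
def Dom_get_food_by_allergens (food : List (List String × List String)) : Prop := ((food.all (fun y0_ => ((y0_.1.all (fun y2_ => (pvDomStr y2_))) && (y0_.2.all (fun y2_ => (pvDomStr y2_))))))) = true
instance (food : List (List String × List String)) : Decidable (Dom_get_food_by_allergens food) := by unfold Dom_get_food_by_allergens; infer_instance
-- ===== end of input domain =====

-- B replaces A's incremental dict-maintenance loop by a simpler dedup-keys-then-collect pipeline.

-- ===== PORT A =====
def get_food_by_allergens (food : List (List String × List String)) : List (String × List Int) :=
  ((PySem.List.enumerate food).foldl
    (fun (tmp : PySem.Dict String (List Int)) p =>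
      p.2.2.foldl
        (fun tmp a =>
          if tmp.contains a = false then tmp.insert a [p.1]
          else tmp.modify a [] (fun l => l ++ [p.1]))
        tmp)
    PySem.Dict.empty).items

-- ===== PORT B =====
def get_food_by_allergens_alt (food : List (List String × List String)) : List (String × List Int) :=
  let order := PySem.List.dedup (food.flatMap (fun p => p.2))
  order.map (fun a =>
    (a, (PySem.List.enumerate food).flatMap
          (fun p => (p.2.2.filter (fun x => x == a)).map (fun _ => p.1))))

-- ===== PRECONDITION & SPEC =====
def Spec_get_food_by_allergens (food : List (List String × List String)) (out : List (String × List Int)) : Prop := out = get_food_by_allergens_alt food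
instance (food : List (List String × List String)) (out : List (String × List Int)) : Decidable (Spec_get_food_by_allergens food out) := by unfold Spec_get_food_by_allergens; infer_instance

-- ===== CLAIM (what is proved, stated in full; the proofs are below) =====
def Claim_equal_get_food_by_allergens : Prop := ∀ (food : List (List String × List String)), Dom_get_food_by_allergens food → Spec_get_food_by_allergens food (get_food_by_allergens food)

-- ===== LEMMAS AND PROOFS =====

-- the (allergen, food-index) occurrence pairs, in A's processing order
def pairsOf (food : List (List String × List String)) : List (String × Int) :=
  (PySem.List.enumerate food).flatMap (fun p => p.2.2.map (fun a => (a, p.1)))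

-- A's if/else branch is exactly a Python dict "modify" step
theorem step_eq_modify (tmp : PySem.Dict String (List Int)) (a : String) (i : Int) :
    (if tmp.contains a = false then tmp.insert a [i]
     else tmp.modify a [] (fun l => l ++ [i]))
    = tmp.modify a [] (fun l => l ++ [i]) := by
  by_cases h : tmp.contains a = false
  · simp [h, PySem.Dict.modify, PySem.Dict.getD_of_not_contains]
  · simp [h]

-- A's nested loops are a single modify-fold over the flattened pair list
theorem A_as_fold (food : List (List String × List String)) :
    get_food_by_allergens food
      = ((pairsOf food).foldl
          (fun (d : PySem.Dict String (List Int)) q => d.modify q.1 [] (fun l => l ++ [q.2]))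
          PySem.Dict.empty).items := by
  simp only [get_food_by_allergens, pairsOf, step_eq_modify, List.foldl_flatMap, List.foldl_map]

theorem flatMap_enumerate_snd {α : Type} (g : (List String × List String) → List α)
    (food : List (List String × List String)) (s : Int) :
    (PySem.List.enumerate food s).flatMap (fun p => g p.2) = food.flatMap g := by
  induction food generalizing s with
  | nil => rfl
  | cons x xs ih => simp [PySem.List.enumerate_cons, ih]

theorem fst_pairsOf (food : List (List String × List String)) :
    (pairsOf food).map Prod.fst = food.flatMap (fun p => p.2) := by
  simp only [pairsOf, List.map_flatMap, List.map_map, Function.comp_def, List.map_id']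
  exact flatMap_enumerate_snd (fun q => q.2) food 0

theorem values_eq (food : List (List String × List String)) (a : String) :
    ((pairsOf food).filter (fun q => q.1 == a)).map Prod.snd
      = (PySem.List.enumerate food).flatMap
          (fun p => (p.2.2.filter (fun x => x == a)).map (fun _ => p.1)) := by
  simp only [pairsOf, List.filter_flatMap, List.map_flatMap, List.filter_map,
    Function.comp_def, List.map_map]

-- ===== VERDICT (by name: the statement is the Claim_ definition above) =====
theorem get_food_by_allergens_spec : Claim_equal_get_food_by_allergens := by
  intro food _
  unfold Spec_get_food_by_allergens get_food_by_allergens_alt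
  rw [A_as_fold]
  have hnd : ((pairsOf food).foldl
      (fun (d : PySem.Dict String (List Int)) q => d.modify q.1 [] (fun l => l ++ [q.2]))
      PySem.Dict.empty).keys.Nodup := by
    exact PySem.Dict.nodup_keys_foldl_modify_key _ _ _ _ _ PySem.Dict.nodup_keys_empty
  rw [PySem.Dict.items_eq_map_keys _ hnd []]
  rw [PySem.Dict.keys_foldl_modify_key]
  simp only [PySem.Dict.keys_empty, PySem.Set.update_nil_left, PySem.List.dedup_eq_ofList,
    fst_pairsOf]
  refine List.map_congr_left (fun a _ => ?_)
  rw [PySem.Dict.getD_foldl_modify_append]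
  simp only [PySem.Dict.getD_empty, List.nil_append, values_eq]
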